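-- pv_equiv track=rewrite | github.com/coherentus/Algo_Ya.Practicum | sprint_1/practice/D.Хаотичность погоды.py | chaotic_weather
-- ===== SOURCE A (Python) =====
-- def chaotic_weather(num_days, thermal_values):
--     """Return counter of days with right conditions.
--
--     Args:
--         num_days (int): how items in array.
--         thermal_values (list of int): thermal per day.
--
--     Returns:
--         int: count of days where temp is stronly lowest in days
--         before and after each day in array.
--         If array have only one day return 1.
--     """
--     if num_days == 1:
--         return 1
--
--     right_count = 0
--     # цикл для дней со второго до предпоследнего
--     # у них есть предыдущий день и следующий
--     for i in range(1, num_days - 1):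
--         reper = thermal_values[i]
--         if (
--             reper > thermal_values[i - 1]
--             and reper > thermal_values[i + 1]
--         ):
--             right_count += 1
--     # проверка для первого дня
--     if thermal_values[0] > thermal_values[1]:
--         right_count += 1
--     # проверка для последнего дня
--     if thermal_values[num_days - 1] > thermal_values[num_days - 2]:
--         right_count += 1
--
--     return right_count
-- ===== SOURCE B (Python) =====
-- def chaotic_weather(num_days, thermal_values):
--     """Count the 'right' days with a rising/falling state machine.
--
--     One forward sweep that never looks at a neighbor pair twice: it keeps a
--     boolean `rising` (did the temperature strictly rise into the current day?),
--     counts a day the moment the temperature strictly drops out of a rise, and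
--     counts the last day if the sweep ends while rising.  The fictitious rise
--     into day 0 (rising starts True) makes the first day follow the same rule.
--     """
--     if num_days == 1:
--         return 1
--     count = 0
--     rising = True
--     prev = thermal_values[0]
--     for i in range(1, num_days):
--         cur = thermal_values[i]
--         if cur < prev:
--             if rising:
--                 count += 1
--             rising = False
--         elif cur > prev:
--             rising = True
--         else:
--             rising = False
--         prev = cur
--     if rising:
--         count += 1
--     return count
-- ===== Notes on version B (the rewrite author's own statement) =====
-- stated objective: alternative
-- what changed: B replaces A's three-case neighbor comparison (interior loop over tv[i-1],tv[i],tv[i+1] plus two separate endpoint branches) with a single-state finite automaton: one sweep carrying a boolean 'rising' flag and the previous value, counting a day exactly when a strict drop ends a rise (initial rising=True and a final rising check subsume both endpoints), so no index ever looks backwards or forwards.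
-- outside the precondition, e.g. on chaotic_weather(0, [2, 2]): A returns 0, B returns 1
import Mathlib
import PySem

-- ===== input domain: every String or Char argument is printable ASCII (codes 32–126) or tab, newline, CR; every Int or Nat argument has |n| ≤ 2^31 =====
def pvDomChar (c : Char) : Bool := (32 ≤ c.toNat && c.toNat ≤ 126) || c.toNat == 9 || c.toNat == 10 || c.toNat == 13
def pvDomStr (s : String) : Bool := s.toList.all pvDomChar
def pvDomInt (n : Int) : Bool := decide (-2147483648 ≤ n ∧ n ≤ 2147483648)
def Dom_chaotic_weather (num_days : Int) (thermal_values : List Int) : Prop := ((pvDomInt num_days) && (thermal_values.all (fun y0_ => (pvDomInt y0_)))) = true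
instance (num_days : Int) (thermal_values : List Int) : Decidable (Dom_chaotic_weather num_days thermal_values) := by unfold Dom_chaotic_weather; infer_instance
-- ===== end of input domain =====

-- B replaces A's neighbor-triple comparisons (interior loop + two endpoint branches)
-- by a one-sweep rising/falling state machine; same O(n) cost, different structure.

-- ===== PORT A =====
def cwAStep (tv : List Int) (acc : Int) (i : Int) : Int :=
  let reper := PySem.List.pyGetD tv i 0
  if reper > PySem.List.pyGetD tv (i - 1) 0 ∧ reper > PySem.List.pyGetD tv (i + 1) 0
  then acc + 1 else acc

def chaotic_weather (num_days : Int) (thermal_values : List Int) : Int :=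
  if num_days = 1 then 1
  else
    let right_count : Int :=
      (PySem.List.pyRange 1 (num_days - 1) 1).foldl (cwAStep thermal_values) 0
    let right_count :=
      if PySem.List.pyGetD thermal_values 0 0 > PySem.List.pyGetD thermal_values 1 0
      then right_count + 1 else right_count
    let right_count :=
      if PySem.List.pyGetD thermal_values (num_days - 1) 0 >
         PySem.List.pyGetD thermal_values (num_days - 2) 0
      then right_count + 1 else right_count
    right_count

-- ===== PORT B =====
-- state = (count, rising, prev)
def cwBStep (tv : List Int) (s : Int × Bool × Int) (i : Int) : Int × Bool × Int :=
  let cur := PySem.List.pyGetD tv i 0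
  if cur < s.2.2 then ((if s.2.1 then s.1 + 1 else s.1), false, cur)
  else if cur > s.2.2 then (s.1, true, cur)
  else (s.1, false, cur)

def chaotic_weather_alt (num_days : Int) (thermal_values : List Int) : Int :=
  if num_days = 1 then 1
  else
    let s := (PySem.List.pyRange 1 num_days 1).foldl (cwBStep thermal_values)
      (0, true, PySem.List.pyGetD thermal_values 0 0)
    if s.2.1 then s.1 + 1 else s.1

-- ===== PRECONDITION & SPEC =====
-- Pre_ is the documented domain (num_days ≥ 1 items present, or a lone day where the
-- list is ignored): outside it A either raises IndexError or, for num_days ≤ 0 with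
-- ≥ 2 values, returns an accidental value via negative-index wraparound.
def Pre_chaotic_weather (num_days : Int) (thermal_values : List Int) : Prop :=
  1 ≤ num_days ∧ (num_days = 1 ∨ num_days ≤ (thermal_values.length : Int))
instance (num_days : Int) (thermal_values : List Int) : Decidable (Pre_chaotic_weather num_days thermal_values) := by unfold Pre_chaotic_weather; infer_instance
def pvWitness_chaotic_weather : Int × List Int := (3, [1, 5, 2])

def Spec_chaotic_weather (num_days : Int) (thermal_values : List Int) (out : Int) : Prop := out = chaotic_weather_alt num_days thermal_values
instance (num_days : Int) (thermal_values : List Int) (out : Int) : Decidable (Spec_chaotic_weather num_days thermal_values out) := by unfold Spec_chaotic_weather; infer_instance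

-- ===== CLAIM (what is proved, stated in full; the proofs are below) =====
def Claim_equal_chaotic_weather : Prop := ∀ (num_days : Int) (thermal_values : List Int), Dom_chaotic_weather num_days thermal_values → Pre_chaotic_weather num_days thermal_values → Spec_chaotic_weather num_days thermal_values (chaotic_weather num_days thermal_values)

-- ===== LEMMAS AND PROOFS =====

theorem cwAStep_eq (tv : List Int) (acc i : Int) :
    cwAStep tv acc i =
      if PySem.List.pyGetD tv i 0 > PySem.List.pyGetD tv (i - 1) 0 ∧
         PySem.List.pyGetD tv i 0 > PySem.List.pyGetD tv (i + 1) 0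
      then acc + 1 else acc := rfl

-- Invariant of B's sweep after processing days 1 .. k-1: the count is A's first-day
-- bonus plus A's interior count up to k-1, rising records the last comparison, and
-- prev is the last value seen.
theorem cw_inv (tv : List Int) (k : Int) (hk : 2 ≤ k) :
    (PySem.List.pyRange 1 k 1).foldl (cwBStep tv) (0, true, PySem.List.pyGetD tv 0 0)
    = ((if PySem.List.pyGetD tv 0 0 > PySem.List.pyGetD tv 1 0 then (1:Int) else 0)
        + (PySem.List.pyRange 1 (k-1) 1).foldl (cwAStep tv) 0,
       decide (PySem.List.pyGetD tv (k-1) 0 > PySem.List.pyGetD tv (k-2) 0),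
       PySem.List.pyGetD tv (k-1) 0) := by
  induction k, hk using Int.le_induction with
  | base =>
      rw [show (2:Int) = 1 + 1 by norm_num, PySem.List.pyRange_one_singleton]
      simp only [List.foldl_cons, List.foldl_nil, cwBStep]
      norm_num [PySem.List.pyRange_one_eq_nil]
      split_ifs <;> simp_all <;> omega
  | succ k hk ih =>
      rw [PySem.List.pyRange_one_succ_right (show (1:Int) ≤ k by omega), List.foldl_append, ih,
          show k + 1 - 1 = k by ring, show k + 1 - 2 = k - 1 by ring,
          show (PySem.List.pyRange 1 k 1) = PySem.List.pyRange 1 (k-1) 1 ++ [k-1] from by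
            rw [← PySem.List.pyRange_one_succ_right (show (1:Int) ≤ k-1 by omega)]; ring_nf]
      simp only [List.foldl_append, List.foldl_cons, List.foldl_nil, cwBStep, cwAStep_eq,
        show k - 1 - 1 = k - 2 from by ring, show k - 1 + 1 = k from by ring]
      split_ifs <;> simp_all <;> omega

theorem cw_eq (n : Int) (tv : List Int)
    (h1 : 1 ≤ n) (h2 : n = 1 ∨ n ≤ (tv.length : Int)) :
    chaotic_weather n tv = chaotic_weather_alt n tv := by
  by_cases hn : n = 1
  · simp [chaotic_weather, chaotic_weather_alt, hn]
  · have hn2 : 2 ≤ n := by omega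
    simp only [chaotic_weather, chaotic_weather_alt, if_neg hn, cw_inv tv n hn2]
    split_ifs <;> simp_all <;> omega

-- ===== VERDICT (by name: the statement is the Claim_ definition above) =====
theorem chaotic_weather_spec : Claim_equal_chaotic_weather := by
  intro n tv _ hpre
  unfold Spec_chaotic_weather
  exact cw_eq n tv hpre.1 hpre.2
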